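-- pv_equiv track=rewrite | github.com/grzegorzborkowski/gcn | dbpl-dataset/DBLPPipeline.py | __count_number_of_articles_per_word__
-- ===== SOURCE A (Python) =====
-- import copy
--
-- def __count_number_of_articles_per_word__(articles):
--     articles_copy = copy.deepcopy(articles)
--     word_to_number_of_articles = {}
--     for article in articles_copy:
--         words_per_article = set()
--         for word in article['abstract']:
--             words_per_article.add(word)
--
--         for word in words_per_article:
--             if word in word_to_number_of_articles:
--                 word_to_number_of_articles[word] += 1
--             else:
--                 word_to_number_of_articles[word] = 1
--     return word_to_number_of_articles
-- ===== SOURCE B (Python) =====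
-- def __count_number_of_articles_per_word__(articles):
--     # inverted index: word -> set of indices of articles containing it
--     index = {}
--     for i, article in enumerate(articles):
--         for word in article['abstract']:
--             if word in index:
--                 index[word].add(i)
--             else:
--                 index[word] = {i}
--     return {word: len(ids) for word, ids in index.items()}
-- ===== Notes on version B (the rewrite author's own statement) =====
-- stated objective: alternative
-- what changed: B builds an inverted index mapping each word to the set of article indices containing it (no per-article dedup set, no deepcopy) and derives the counts in a second pass over the index, instead of A's per-article word-set plus running counter.
import Mathlib
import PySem

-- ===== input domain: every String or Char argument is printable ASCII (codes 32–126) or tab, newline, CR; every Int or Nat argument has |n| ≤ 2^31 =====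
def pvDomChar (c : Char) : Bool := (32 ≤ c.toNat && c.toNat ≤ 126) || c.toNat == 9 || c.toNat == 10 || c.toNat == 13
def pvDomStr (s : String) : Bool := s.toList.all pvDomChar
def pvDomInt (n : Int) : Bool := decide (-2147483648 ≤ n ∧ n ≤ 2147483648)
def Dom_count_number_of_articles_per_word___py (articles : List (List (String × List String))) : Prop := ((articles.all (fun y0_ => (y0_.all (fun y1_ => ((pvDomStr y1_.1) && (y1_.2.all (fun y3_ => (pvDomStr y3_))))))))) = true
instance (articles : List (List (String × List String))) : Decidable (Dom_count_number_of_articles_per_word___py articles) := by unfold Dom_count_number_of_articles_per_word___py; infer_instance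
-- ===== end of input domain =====

-- B replaces A's per-article word-set + running counter by an inverted index (word -> set of
-- article indices) computed in one pass and a second pass taking the size of each index set;
-- the deepcopy is dropped (nothing is mutated), so only the RETURN value is compared.

-- ===== PORT A =====
-- article['abstract'] (both Pythons raise KeyError when the key is missing; Pre_ excludes that,
-- so the `.getD []` totalisation is never reached on admitted inputs)
def pvAbstract (article : List (String × List String)) : List String :=
  ((PySem.Dict.mk article).get? "abstract").getD []

def count_number_of_articles_per_word___py (articles : List (List (String × List String))) : List (String × Int) :=
  (articles.foldl
    (fun word_to_number_of_articles article =>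
      -- words_per_article = set(); for word in article['abstract']: words_per_article.add(word)
      let words_per_article : PySem.Set String := PySem.Set.ofList (pvAbstract article)
      -- for word in words_per_article: increment-or-initialise the counter
      words_per_article.foldl
        (fun d word =>
          if d.contains word then d.insert word (d.getD word 0 + 1)
          else d.insert word 1)
        word_to_number_of_articles)
    PySem.Dict.empty).items

-- ===== PORT B =====
def count_number_of_articles_per_word___py_alt (articles : List (List (String × List String))) : List (String × Int) :=
  -- build the inverted index word -> set of article indices
  let index : PySem.Dict String (PySem.Set Int) :=
    (PySem.List.enumerate articles 0).foldl
      (fun idx p =>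
        (pvAbstract p.2).foldl
          (fun idx word =>
            if idx.contains word then idx.modify word [] (fun s => PySem.Set.add s p.1)
            else idx.insert word [p.1])
          idx)
      PySem.Dict.empty
  -- second pass: word -> len(set of indices)
  index.items.map (fun q => (q.1, (q.2.length : Int)))

-- ===== PRECONDITION & SPEC =====
-- Pre_ excludes exactly the inputs on which Python A raises KeyError: an article without 'abstract'.
def Pre_count_number_of_articles_per_word___py (articles : List (List (String × List String))) : Prop :=
  ∀ article ∈ articles, (PySem.Dict.mk article).contains "abstract" = true
instance (articles : List (List (String × List String))) : Decidable (Pre_count_number_of_articles_per_word___py articles) := by unfold Pre_count_number_of_articles_per_word___py; infer_instance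

def pvWitness_count_number_of_articles_per_word___py : (List (List (String × List String))) :=
  ([[("abstract", ["a", "b", "a"])], [("abstract", ["b"]), ("title", ["t"])]])

def Spec_count_number_of_articles_per_word___py (articles : List (List (String × List String))) (out : List (String × Int)) : Prop := out = count_number_of_articles_per_word___py_alt articles
instance (articles : List (List (String × List String))) (out : List (String × Int)) : Decidable (Spec_count_number_of_articles_per_word___py articles out) := by unfold Spec_count_number_of_articles_per_word___py; infer_instance

-- ===== CLAIM (what is proved, stated in full; the proofs are below) =====
def Claim_equal_count_number_of_articles_per_word___py : Prop := ∀ (articles : List (List (String × List String))), Dom_count_number_of_articles_per_word___py articles → Pre_count_number_of_articles_per_word___py articles → Spec_count_number_of_articles_per_word___py articles (count_number_of_articles_per_word___py articles)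

-- ===== LEMMAS AND PROOFS =====

-- A's branch collapses to a single unconditional insert
theorem pv_stepA_eq (d : PySem.Dict String Int) (w : String) :
    (if d.contains w then d.insert w (d.getD w 0 + 1) else d.insert w 1)
      = d.insert w (d.getD w 0 + 1) := by
  by_cases h : d.contains w = true
  · simp [h]
  · simp only [Bool.not_eq_true] at h
    simp [h, PySem.Dict.getD_of_not_contains _ _ h]

-- B's branch collapses to a single unconditional insert
theorem pv_stepB_eq (idx : PySem.Dict String (PySem.Set Int)) (w : String) (i : Int) :
    (if idx.contains w then idx.modify w [] (fun s => PySem.Set.add s i)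
     else idx.insert w [i])
      = idx.insert w (PySem.Set.add (idx.getD w []) i) := by
  by_cases h : idx.contains w = true
  · simp only [h, if_true]
    exact PySem.Dict.ext_iff.mpr rfl
  · simp only [Bool.not_eq_true] at h
    simp [h, PySem.Dict.getD_of_not_contains _ _ h, PySem.Set.add]

-- a fold over a flatMap is the nested fold
theorem pv_foldl_flatMap {α β γ : Type} (l : List α) (g : α → List β) (f : γ → β → γ) (init : γ) :
    (l.flatMap g).foldl f init = l.foldl (fun acc x => (g x).foldl f acc) init := by
  induction l generalizing init with
  | nil => rfl
  | cons a l ih => simp [List.flatMap_cons, List.foldl_append, ih]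

-- Set.update distributes over Set.add on the right
theorem pv_update_add {α : Type} [BEq α] [LawfulBEq α] (s t : PySem.Set α) (x : α) :
    PySem.Set.update s (PySem.Set.add t x) = PySem.Set.add (PySem.Set.update s t) x := by
  by_cases hx : x ∈ t
  · rw [PySem.Set.add_of_mem hx, PySem.Set.add_of_mem]
    exact (PySem.Set.mem_update _ _ _).mpr (Or.inr hx)
  · rw [PySem.Set.add_of_not_mem hx]
    simp [PySem.Set.update, List.foldl_append, PySem.Set.add]

theorem pv_update_foldl_add {α : Type} [BEq α] [LawfulBEq α] (l : List α) (s t : PySem.Set α) :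
    PySem.Set.update s (l.foldl PySem.Set.add t) = PySem.Set.update (PySem.Set.update s t) l := by
  induction l generalizing t s with
  | nil => rfl
  | cons x l ih =>
    show PySem.Set.update s (l.foldl PySem.Set.add (PySem.Set.add t x)) = _
    rw [ih, pv_update_add]
    rfl

theorem pv_update_ofList {α : Type} [BEq α] [LawfulBEq α] (l : List α) (s : PySem.Set α) :
    PySem.Set.update s (PySem.Set.ofList l) = PySem.Set.update s l := by
  have := pv_update_foldl_add l s []
  simpa [PySem.Set.ofList_eq_foldl] using this

-- dedup inside a flatMap does not change the resulting set
theorem pv_update_flatMap_ofList {α β : Type} [BEq β] [LawfulBEq β]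
    (xs : List α) (f : α → List β) (s : PySem.Set β) :
    PySem.Set.update s (xs.flatMap (fun a => PySem.Set.ofList (f a)))
      = PySem.Set.update s (xs.flatMap f) := by
  induction xs generalizing s with
  | nil => rfl
  | cons a xs ih =>
    simp only [List.flatMap_cons]
    show PySem.Set.update s (PySem.Set.ofList (f a) ++ _) = PySem.Set.update s (f a ++ _)
    rw [PySem.Set.update, PySem.Set.update, List.foldl_append, List.foldl_append]
    rw [show (f a).foldl PySem.Set.add s = PySem.Set.update s (f a) from rfl]
    rw [show (PySem.Set.ofList (f a)).foldl PySem.Set.add s = PySem.Set.update s (PySem.Set.ofList (f a)) from rfl]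
    rw [pv_update_ofList]
    exact ih _

theorem pv_ofList_flatMap_ofList {α β : Type} [BEq β] [LawfulBEq β] (xs : List α) (f : α → List β) :
    PySem.Set.ofList (xs.flatMap (fun a => PySem.Set.ofList (f a)))
      = PySem.Set.ofList (xs.flatMap f) :=
  pv_update_flatMap_ofList xs f []

-- count of w in a deduped list
theorem pv_count_ofList (l : List String) (w : String) :
    (PySem.Set.ofList l).count w = if w ∈ l then 1 else 0 := by
  by_cases h : w ∈ l
  · simp only [h, if_true]
    exact List.count_eq_one_of_mem (PySem.Set.nodup_ofList l) ((PySem.Set.mem_ofList _ _).mpr h)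
  · simp only [h, if_false]
    exact List.count_eq_zero.mpr (fun hm => h ((PySem.Set.mem_ofList _ _).mp hm))

theorem pv_count_flatMap_ofList {α : Type} (xs : List α) (f : α → List String) (w : String) :
    ((xs.flatMap (fun a => PySem.Set.ofList (f a))).count w : Int)
      = (xs.countP (fun a => decide (w ∈ f a)) : Int) := by
  induction xs with
  | nil => rfl
  | cons a xs ih =>
    simp only [List.flatMap_cons, List.count_append, List.countP_cons, pv_count_ofList]
    by_cases h : w ∈ f a <;> simp [h] <;> omega

-- the per-key value accumulated by B's fold
theorem pv_getD_foldl_insert_add (L : List (String × Int)) (d : PySem.Dict String (PySem.Set Int)) (w : String) :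
    (L.foldl (fun idx p => idx.insert p.1 (PySem.Set.add (idx.getD p.1 []) p.2)) d).getD w []
      = PySem.Set.update (d.getD w []) ((L.filter (fun p => p.1 == w)).map (·.2)) := by
  induction L generalizing d with
  | nil => rfl
  | cons p L ih =>
    simp only [List.foldl_cons, ih, List.filter_cons]
    by_cases h : p.1 = w
    · subst h
      simp [PySem.Set.update]
    · have h2 : (p.1 == w) = false := by simpa using h
      have h3 : ¬ w = p.1 := fun hh => h hh.symm
      simp [PySem.Dict.getD_insert, h2, h3]

-- the (word, i) pairs of one article, filtered to word w, are count-many copies of i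
theorem pv_filter_pairs (l : List String) (i : Int) (w : String) :
    ((l.map (fun w' => (w', i))).filter (fun p => p.1 == w)).map (·.2)
      = List.replicate (l.count w) i := by
  induction l with
  | nil => rfl
  | cons x l ih =>
    simp only [List.map_cons, List.filter_cons, List.count_cons]
    by_cases h : x = w
    · subst h; simp [List.replicate_succ, ih]
    · simp [h, ih]

theorem pv_update_replicate_mem (n : Nat) (s : PySem.Set Int) (i : Int) (h : i ∈ s) :
    PySem.Set.update s (List.replicate n i) = s := by
  induction n with
  | zero => rfl
  | succ n ih =>
    show PySem.Set.update (PySem.Set.add s i) (List.replicate n i) = s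
    rw [PySem.Set.add_of_mem h, ih]

theorem pv_update_replicate (n : Nat) (s : PySem.Set Int) (i : Int) :
    PySem.Set.update s (List.replicate n i) = if n = 0 then s else PySem.Set.add s i := by
  cases n with
  | zero => rfl
  | succ n =>
    show PySem.Set.update (PySem.Set.add s i) (List.replicate n i) = _
    rw [pv_update_replicate_mem n _ i ((PySem.Set.mem_add _ _ _).mpr (Or.inr rfl))]
    simp

-- the size of the index set of w is the number of articles containing w
theorem pv_len_update_flatMap (w : String) (xs : List (List (String × List String)))
    (i0 : Int) (s : PySem.Set Int) (hs : ∀ j ∈ s, j < i0) :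
    (PySem.Set.update s ((PySem.List.enumerate xs i0).flatMap
        (fun p => List.replicate ((pvAbstract p.2).count w) p.1))).length
      = s.length + xs.countP (fun a => decide (w ∈ pvAbstract a)) := by
  induction xs generalizing i0 s with
  | nil => simp [PySem.List.enumerate_nil]
  | cons a xs ih =>
    rw [PySem.List.enumerate_cons, List.flatMap_cons]
    rw [show ∀ l1 l2, PySem.Set.update s (l1 ++ l2) = PySem.Set.update (PySem.Set.update s l1) l2
          from fun l1 l2 => by simp [PySem.Set.update, List.foldl_append]]
    rw [pv_update_replicate]
    simp only [List.countP_cons]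
    by_cases h : w ∈ pvAbstract a
    · have hc : (pvAbstract a).count w ≠ 0 := by
        simpa [List.count_eq_zero] using h
      have hi : i0 ∉ s := fun hm => absurd (hs i0 hm) (lt_irrefl i0)
      rw [if_neg hc, PySem.Set.add_of_not_mem hi]
      rw [ih (i0 + 1) (s ++ [i0]) (by
        intro j hj
        rcases List.mem_append.mp hj with hj | hj
        · exact lt_trans (hs j hj) (by omega)
        · simp at hj; omega)]
      simp [h]
      omega
    · have hc : (pvAbstract a).count w = 0 := List.count_eq_zero.mpr h
      rw [if_pos hc]
      rw [ih (i0 + 1) s (fun j hj => lt_trans (hs j hj) (by omega))]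
      simp [h]

-- the (word, article-index) pairs B's nested loop runs over, flattened
def pvPairs (articles : List (List (String × List String))) : List (String × Int) :=
  (PySem.List.enumerate articles 0).flatMap (fun p => (pvAbstract p.2).map (fun w' => (w', p.1)))

theorem pv_B_index (articles : List (List (String × List String))) :
    (PySem.List.enumerate articles 0).foldl
        (fun idx p =>
          (pvAbstract p.2).foldl
            (fun idx word =>
              if idx.contains word then idx.modify word [] (fun s => PySem.Set.add s p.1)
              else idx.insert word [p.1]) idx)
        PySem.Dict.empty
      = (pvPairs articles).foldl
          (fun idx q => idx.insert q.1 (PySem.Set.add (idx.getD q.1 []) q.2)) PySem.Dict.empty := by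
  rw [pvPairs, pv_foldl_flatMap]
  congr 1
  funext idx p
  rw [List.foldl_map]
  simp only [pv_stepB_eq]

theorem pv_pairs_fst (articles : List (List (String × List String))) :
    (pvPairs articles).map (·.1) = articles.flatMap pvAbstract := by
  conv_rhs => rw [← PySem.List.map_snd_enumerate articles 0]
  rw [List.flatMap_map]
  simp only [pvPairs, List.map_flatMap]
  exact List.flatMap_congr (fun p _ => by simp [Function.comp_def])

theorem pv_pairs_vlist (articles : List (List (String × List String))) (w : String) :
    ((pvPairs articles).filter (fun p => p.1 == w)).map (·.2)
      = (PySem.List.enumerate articles 0).flatMap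
          (fun p => List.replicate ((pvAbstract p.2).count w) p.1) := by
  simp only [pvPairs, List.filter_flatMap, List.map_flatMap]
  exact List.flatMap_congr (fun p _ => pv_filter_pairs _ _ _)

theorem pv_A_characterisation (articles : List (List (String × List String))) :
    count_number_of_articles_per_word___py articles
      = (PySem.Set.ofList (articles.flatMap (fun a => PySem.Set.ofList (pvAbstract a)))).map
          (fun k => (k, ((articles.flatMap (fun a => PySem.Set.ofList (pvAbstract a))).count k : Int))) := by
  unfold count_number_of_articles_per_word___py
  simp only [pv_stepA_eq]
  rw [← pv_foldl_flatMap]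
  rw [PySem.Dict.foldl_insert_getD_add_one_eq_counter, PySem.Dict.items_counter]

theorem pv_B_characterisation (articles : List (List (String × List String))) :
    count_number_of_articles_per_word___py_alt articles
      = (PySem.Set.ofList (articles.flatMap pvAbstract)).map
          (fun k => (k, ((articles.countP (fun a => decide (k ∈ pvAbstract a))) : Int))) := by
  unfold count_number_of_articles_per_word___py_alt
  simp only [pv_B_index]
  have hnd : ((pvPairs articles).foldl
      (fun idx q => idx.insert q.1 (PySem.Set.add (idx.getD q.1 []) q.2)) PySem.Dict.empty).keys.Nodup :=
    PySem.Dict.nodup_keys_foldl_insert_key (pvPairs articles) (fun q : String × Int => q.1)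
      (fun idx q => PySem.Set.add (idx.getD q.1 []) q.2) PySem.Dict.empty (by simp [PySem.Dict.keys_empty])
  rw [PySem.Dict.items_eq_map_keys _ hnd []]
  rw [PySem.Dict.keys_foldl_insert_key (pvPairs articles) (fun q => q.1)
        (fun idx q => PySem.Set.add (idx.getD q.1 []) q.2) PySem.Dict.empty]
  have hkeys : PySem.Set.update (PySem.Dict.keys (PySem.Dict.empty : PySem.Dict String (PySem.Set Int))) ((pvPairs articles).map (fun q => q.1))
      = PySem.Set.ofList (articles.flatMap pvAbstract) := by
    rw [← pv_pairs_fst articles, PySem.Set.ofList_eq_foldl]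
    rfl
  rw [hkeys, List.map_map]
  apply List.map_congr_left
  intro k _
  simp only [Function.comp]
  congr 1
  rw [pv_getD_foldl_insert_add, PySem.Dict.getD_empty, pv_pairs_vlist]
  have := pv_len_update_flatMap k articles 0 [] (by intro j hj; simp at hj)
  simp only [List.length_nil, Nat.zero_add] at this
  rw [this]

-- ===== VERDICT (by name: the statement is the Claim_ definition above) =====
theorem count_number_of_articles_per_word___py_spec : Claim_equal_count_number_of_articles_per_word___py := by
  intro articles _ _
  unfold Spec_count_number_of_articles_per_word___py
  rw [pv_A_characterisation, pv_B_characterisation, pv_ofList_flatMap_ofList]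
  apply List.map_congr_left
  intro k _
  rw [pv_count_flatMap_ofList]
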